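-- pv_equiv track=rewrite | github.com/artkpv/code-dojo | Pramp.com/matrix_spiral_copy.py | iterate_border
-- ===== SOURCE A (Python) =====
-- def iterate_border(mat, i, j, n, m):
--   a = []
--   if m > 0:
--     for k in range(m):  # right
--       a += [mat[i][j+k]]
--   if n > 1:
--     for k in range(n-1):  # down
--       a += [mat[i+1+k][j+m-1]]
--   if n > 1 and m > 1:
--     for k in range(m-1):  # left
--       a += [mat[i+n-1][j+m-2-k]]
--   if n > 1 and m > 1:
--     for k in range(n-2):  # up
--       a += [mat[i+n-2-k][j]]
--   return a
-- ===== SOURCE B (Python) =====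
-- def iterate_border(mat, i, j, n, m):
--     # Closed-form decode: one flat pass t = 0..total-1 over the whole border,
--     # with an arithmetic map from t to the coordinates of the t-th border cell.
--     t1 = m if m > 0 else 0
--     t2 = t1 + (n - 1 if n > 1 else 0)
--     t3 = t2 + (m - 1 if n > 1 and m > 1 else 0)
--     total = t3 + (n - 2 if n > 1 and m > 1 else 0)
--
--     def cell(t):
--         if t < t1:
--             return i, j + t
--         if t < t2:
--             return i + 1 + (t - t1), j + m - 1
--         if t < t3:
--             return i + n - 1, j + m - 2 - (t - t2)
--         return i + n - 2 - (t - t3), j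
--
--     return [mat[r][c] for r, c in map(cell, range(total))]
-- ===== Notes on version B (the rewrite author's own statement) =====
-- stated objective: alternative
-- what changed: Replaced A's four conditional per-side loops by one flat pass over range(total perimeter length) with a closed-form arithmetic decoder mapping each flat position t directly to its border coordinates.
import Mathlib
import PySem

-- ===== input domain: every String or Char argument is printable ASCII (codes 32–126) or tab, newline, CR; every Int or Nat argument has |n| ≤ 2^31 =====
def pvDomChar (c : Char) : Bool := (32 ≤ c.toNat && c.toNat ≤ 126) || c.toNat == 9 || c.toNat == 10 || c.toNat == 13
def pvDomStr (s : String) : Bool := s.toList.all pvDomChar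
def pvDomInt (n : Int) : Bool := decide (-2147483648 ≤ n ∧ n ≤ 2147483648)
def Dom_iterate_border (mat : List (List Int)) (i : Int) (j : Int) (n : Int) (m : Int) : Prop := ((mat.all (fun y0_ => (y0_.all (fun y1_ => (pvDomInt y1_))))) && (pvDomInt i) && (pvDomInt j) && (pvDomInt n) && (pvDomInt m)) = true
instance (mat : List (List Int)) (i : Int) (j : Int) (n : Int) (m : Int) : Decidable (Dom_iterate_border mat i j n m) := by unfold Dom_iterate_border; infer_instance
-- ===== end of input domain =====

-- B replaces A's four conditional loops by ONE flat pass over range(total) with a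
-- closed-form arithmetic decoder from flat position t to border coordinates;
-- equivalence of the return values is proved on the non-raising inputs (Pre_).

-- mat[r][c] with Python semantics (negative wrap; default 0 where Python raises --
-- Pre_ excludes those inputs)
def pvAt (mat : List (List Int)) (r c : Int) : Int :=
  (PySem.List.pyGet? ((PySem.List.pyGet? mat r).getD []) c).getD 0

-- ===== PORT A =====
def iterate_border (mat : List (List Int)) (i : Int) (j : Int) (n : Int) (m : Int) : List Int :=
  let a : List Int := []
  let a := if m > 0 then
      (PySem.List.pyRange 0 m 1).foldl (fun a k => a ++ [pvAt mat i (j + k)]) a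
    else a
  let a := if n > 1 then
      (PySem.List.pyRange 0 (n - 1) 1).foldl (fun a k => a ++ [pvAt mat (i + 1 + k) (j + m - 1)]) a
    else a
  let a := if n > 1 ∧ m > 1 then
      (PySem.List.pyRange 0 (m - 1) 1).foldl (fun a k => a ++ [pvAt mat (i + n - 1) (j + m - 2 - k)]) a
    else a
  let a := if n > 1 ∧ m > 1 then
      (PySem.List.pyRange 0 (n - 2) 1).foldl (fun a k => a ++ [pvAt mat (i + n - 2 - k) j]) a
    else a
  a

-- ===== PORT B =====
-- arithmetic decoder: flat border position t ↦ coordinates of the t-th border cell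
def pvCell (i j n m t1 t2 t3 : Int) (t : Int) : Int × Int :=
  if t < t1 then (i, j + t)
  else if t < t2 then (i + 1 + (t - t1), j + m - 1)
  else if t < t3 then (i + n - 1, j + m - 2 - (t - t2))
  else (i + n - 2 - (t - t3), j)

def iterate_border_alt (mat : List (List Int)) (i : Int) (j : Int) (n : Int) (m : Int) : List Int :=
  let t1 : Int := if m > 0 then m else 0
  let t2 : Int := t1 + (if n > 1 then n - 1 else 0)
  let t3 : Int := t2 + (if n > 1 ∧ m > 1 then m - 1 else 0)
  let total : Int := t3 + (if n > 1 ∧ m > 1 then n - 2 else 0)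
  (PySem.List.pyRange 0 total 1).map
    (fun t => let rc := pvCell i j n m t1 t2 t3 t; pvAt mat rc.1 rc.2)

-- ===== PRECONDITION & SPEC =====
-- wrap-aware Python index-validity of x in a list of length len
def pvInR (len : Nat) (x : Int) : Bool := decide (-(len : Int) ≤ x) && decide (x < (len : Int))

-- length of row r of mat under Python indexing (0 for an invalid row index)
def pvRowLen (mat : List (List Int)) (r : Int) : Nat := ((PySem.List.pyGet? mat r).getD []).length

-- true iff every access mat[r][c] made by A succeeds (interval endpoints for the
-- fixed-row sides, row-by-row for the columns, so it evaluates fast)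
def pvNoRaise (mat : List (List Int)) (i j n m : Int) : Bool :=
  (if 0 < m then
      pvInR mat.length i && pvInR (pvRowLen mat i) j && pvInR (pvRowLen mat i) (j + m - 1)
    else true)
  &&
  (if 1 < n then
      pvInR mat.length (i + 1) && pvInR mat.length (i + n - 1)
        && (PySem.List.pyRange (i + 1) (i + n) 1).all (fun r => pvInR (pvRowLen mat r) (j + m - 1))
    else true)
  &&
  (if 1 < n && 1 < m then
      pvInR (pvRowLen mat (i + n - 1)) j && pvInR (pvRowLen mat (i + n - 1)) (j + m - 2)
        && (PySem.List.pyRange (i + 1) (i + n - 1) 1).all (fun r => pvInR (pvRowLen mat r) j)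
    else true)

-- Pre_ excludes exactly the inputs on which some access mat[r][c] raises IndexError in A.
def Pre_iterate_border (mat : List (List Int)) (i : Int) (j : Int) (n : Int) (m : Int) : Prop :=
  pvNoRaise mat i j n m = true

instance (mat : List (List Int)) (i : Int) (j : Int) (n : Int) (m : Int) :
    Decidable (Pre_iterate_border mat i j n m) := by unfold Pre_iterate_border; infer_instance

def pvWitness_iterate_border : List (List Int) × Int × Int × Int × Int :=
  ([[1, 2], [3, 4]], 0, 0, 2, 2)

def Spec_iterate_border (mat : List (List Int)) (i : Int) (j : Int) (n : Int) (m : Int) (out : List Int) : Prop := out = iterate_border_alt mat i j n m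
instance (mat : List (List Int)) (i : Int) (j : Int) (n : Int) (m : Int) (out : List Int) : Decidable (Spec_iterate_border mat i j n m out) := by unfold Spec_iterate_border; infer_instance

-- ===== CLAIM (what is proved, stated in full; the proofs are below) =====
def Claim_equal_iterate_border : Prop := ∀ (mat : List (List Int)) (i : Int) (j : Int) (n : Int) (m : Int), Dom_iterate_border mat i j n m → Pre_iterate_border mat i j n m → Spec_iterate_border mat i j n m (iterate_border mat i j n m)

-- ===== LEMMAS AND PROOFS =====

lemma pv_range_split4 {α : Type} (a b c d : Nat) (f : Nat → α) :
    (List.range (a + b + c + d)).map f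
      = (List.range a).map f ++ (List.range b).map (fun k => f (a + k))
        ++ (List.range c).map (fun k => f (a + b + k))
        ++ (List.range d).map (fun k => f (a + b + c + k)) := by
  simp [List.range_add, List.map_map, Function.comp_def, Nat.add_assoc, List.append_assoc]

-- the decoded flat pass splits into the four border segments
lemma pv_decode_split (mat : List (List Int)) (i j n m t1 t2 t3 total : Int)
    (h0 : 0 ≤ t1) (h1 : t1 ≤ t2) (h2 : t2 ≤ t3) (h3 : t3 ≤ total) :
    (List.range total.toNat).map (fun (k : Nat) =>
        pvAt mat (pvCell i j n m t1 t2 t3 (k : Int)).1 (pvCell i j n m t1 t2 t3 (k : Int)).2)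
      = (List.range t1.toNat).map (fun (k : Nat) => pvAt mat i (j + (k : Int)))
        ++ (List.range (t2 - t1).toNat).map (fun (k : Nat) => pvAt mat (i + 1 + (k : Int)) (j + m - 1))
        ++ (List.range (t3 - t2).toNat).map (fun (k : Nat) => pvAt mat (i + n - 1) (j + m - 2 - (k : Int)))
        ++ (List.range (total - t3).toNat).map (fun (k : Nat) => pvAt mat (i + n - 2 - (k : Int)) j) := by
  have htot : total.toNat = t1.toNat + (t2 - t1).toNat + (t3 - t2).toNat + (total - t3).toNat := by
    omega
  rw [htot, pv_range_split4]
  have hs1 : (List.range t1.toNat).map (fun (k : Nat) =>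
      pvAt mat (pvCell i j n m t1 t2 t3 (k : Int)).1 (pvCell i j n m t1 t2 t3 (k : Int)).2)
      = (List.range t1.toNat).map (fun (k : Nat) => pvAt mat i (j + (k : Int))) := by
    refine List.map_congr_left fun k hk => ?_
    have hk' : k < t1.toNat := List.mem_range.mp hk
    rw [pvCell, if_pos (by omega)]
  have hs2 : (List.range (t2 - t1).toNat).map (fun (k : Nat) =>
      pvAt mat (pvCell i j n m t1 t2 t3 ((t1.toNat + k : Nat) : Int)).1
        (pvCell i j n m t1 t2 t3 ((t1.toNat + k : Nat) : Int)).2)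
      = (List.range (t2 - t1).toNat).map (fun (k : Nat) => pvAt mat (i + 1 + (k : Int)) (j + m - 1)) := by
    refine List.map_congr_left fun k hk => ?_
    have hk' : k < (t2 - t1).toNat := List.mem_range.mp hk
    rw [pvCell, if_neg (by omega), if_pos (by omega)]
    have e : ((t1.toNat + k : Nat) : Int) - t1 = (k : Int) := by omega
    simp only [e]
  have hs3 : (List.range (t3 - t2).toNat).map (fun (k : Nat) =>
      pvAt mat (pvCell i j n m t1 t2 t3 ((t1.toNat + (t2 - t1).toNat + k : Nat) : Int)).1
        (pvCell i j n m t1 t2 t3 ((t1.toNat + (t2 - t1).toNat + k : Nat) : Int)).2)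
      = (List.range (t3 - t2).toNat).map (fun (k : Nat) => pvAt mat (i + n - 1) (j + m - 2 - (k : Int))) := by
    refine List.map_congr_left fun k hk => ?_
    have hk' : k < (t3 - t2).toNat := List.mem_range.mp hk
    rw [pvCell, if_neg (by omega), if_neg (by omega), if_pos (by omega)]
    have e : ((t1.toNat + (t2 - t1).toNat + k : Nat) : Int) - t2 = (k : Int) := by omega
    simp only [e]
  have hs4 : (List.range (total - t3).toNat).map (fun (k : Nat) =>
      pvAt mat (pvCell i j n m t1 t2 t3 ((t1.toNat + (t2 - t1).toNat + (t3 - t2).toNat + k : Nat) : Int)).1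
        (pvCell i j n m t1 t2 t3 ((t1.toNat + (t2 - t1).toNat + (t3 - t2).toNat + k : Nat) : Int)).2)
      = (List.range (total - t3).toNat).map (fun (k : Nat) => pvAt mat (i + n - 2 - (k : Int)) j) := by
    refine List.map_congr_left fun k hk => ?_
    rw [pvCell, if_neg (by omega), if_neg (by omega), if_neg (by omega)]
    have e : ((t1.toNat + (t2 - t1).toNat + (t3 - t2).toNat + k : Nat) : Int) - t3 = (k : Int) := by omega
    simp only [e]
  rw [hs1, hs2, hs3, hs4]

lemma pv_main (mat : List (List Int)) (i j n m : Int) :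
    iterate_border mat i j n m = iterate_border_alt mat i j n m := by
  unfold iterate_border iterate_border_alt
  simp only [PySem.List.pyRange_one, List.foldl_map, List.map_map,
    PySem.List.foldl_append_singleton_eq_map, List.nil_append, Int.sub_zero,
    zero_add, Function.comp_def]
  by_cases hn : n > 1
  · by_cases hm : m > 0
    · by_cases hm1 : m > 1
      · simp only [if_pos hm, if_pos hn, if_pos (And.intro hn hm1)]
        rw [pv_decode_split mat i j n m m (m + (n - 1)) (m + (n - 1) + (m - 1))
            (m + (n - 1) + (m - 1) + (n - 2)) (by omega) (by omega) (by omega) (by omega)]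
        have e2 : m + (n - 1) - m = n - 1 := by ring
        have e3 : m + (n - 1) + (m - 1) - (m + (n - 1)) = m - 1 := by ring
        have e4 : m + (n - 1) + (m - 1) + (n - 2) - (m + (n - 1) + (m - 1)) = n - 2 := by ring
        rw [e2, e3, e4]
      · have hge : ¬ (n > 1 ∧ m > 1) := fun hh => hm1 hh.2
        simp only [if_pos hm, if_pos hn, if_neg hge, add_zero]
        rw [pv_decode_split mat i j n m m (m + (n - 1)) (m + (n - 1)) (m + (n - 1))
            (by omega) (by omega) (by omega) (by omega)]
        have e2 : m + (n - 1) - m = n - 1 := by ring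
        rw [e2]
        simp only [sub_self, Int.toNat_zero, List.range_zero, List.map_nil, List.append_nil]
    · have hge : ¬ (n > 1 ∧ m > 1) := fun hh => hm (by omega)
      simp only [if_neg hm, if_pos hn, if_neg hge, zero_add, add_zero]
      rw [pv_decode_split mat i j n m 0 (n - 1) (n - 1) (n - 1)
          (by omega) (by omega) (by omega) (by omega)]
      simp only [Int.toNat_zero, List.range_zero, List.map_nil, List.nil_append,
        sub_self, List.append_nil, sub_zero]
  · have hge : ¬ (n > 1 ∧ m > 1) := fun hh => hn hh.1
    by_cases hm : m > 0
    · simp only [if_pos hm, if_neg hn, if_neg hge, add_zero]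
      rw [pv_decode_split mat i j n m m m m m (by omega) (by omega) (by omega) (by omega)]
      simp only [sub_self, Int.toNat_zero, List.range_zero, List.map_nil, List.append_nil]
    · simp only [if_neg hm, if_neg hn, if_neg hge, add_zero]
      rw [pv_decode_split mat i j n m 0 0 0 0 (by omega) (by omega) (by omega) (by omega)]
      simp

-- ===== VERDICT (by name: the statement is the Claim_ definition above) =====
theorem iterate_border_spec : Claim_equal_iterate_border := by
  intro mat i j n m _ _
  unfold Spec_iterate_border
  exact pv_main mat i j n m
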